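-- pv_equiv track=rewrite | github.com/Jack-cpu666/refracting | app.py | _group_into_use_cases
-- ===== SOURCE A (Python) =====
-- from typing import Dict, List, Set, Tuple, Optional, Any, Union, Type, Callable
-- from collections import defaultdict, Counter, OrderedDict
--
-- def _group_into_use_cases(services: List) -> Dict[str, List]:
--     """Group service functions into use cases."""
--     groups = defaultdict(list)
--
--     for func in services:
--         # Group by function name patterns
--         name = func['name'].lower()
--         if 'create' in name or 'add' in name:
--             groups['create_entity'].append(func)
--         elif 'update' in name or 'edit' in name:
--             groups['update_entity'].append(func)
--         elif 'delete' in name or 'remove' in name: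
--             groups['delete_entity'].append(func)
--         elif 'get' in name or 'find' in name or 'list' in name:
--             groups['query_entity'].append(func)
--         else:
--             groups['process_business_logic'].append(func)
--
--     return dict(groups)
-- ===== SOURCE B (Python) =====
-- _RULES = [
--     ('create_entity', ('create', 'add')),
--     ('update_entity', ('update', 'edit')),
--     ('delete_entity', ('delete', 'remove')),
--     ('query_entity', ('get', 'find', 'list')),
-- ]
--
-- def _classify(name):
--     for bucket, kws in _RULES:
--         if any(kw in name for kw in kws):
--             return bucket
--     return 'process_business_logic'
--
-- def _group_into_use_cases(services):
--     """Staged group-by: label every func with its bucket, dedup the labels in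
--     first-encounter order, then build each bucket's list by filtering the
--     labeled pairs (no mutable dict-of-lists accumulator)."""
--     labeled = [(_classify(f['name'].lower()), f) for f in services]
--     order = list(dict.fromkeys(b for b, _ in labeled))
--     return {b: [f for bb, f in labeled if bb == b] for b in order}
-- ===== Notes on version B (the rewrite author's own statement) =====
-- stated objective: alternative
-- what changed: Replaced A's single pass that mutates a defaultdict of lists via an if/elif chain by three staged passes: label each func with its bucket (first-matching rule from an ordered table), dedup the labels in first-encounter order, then build each bucket by filtering the labeled pairs.
import Mathlib
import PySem

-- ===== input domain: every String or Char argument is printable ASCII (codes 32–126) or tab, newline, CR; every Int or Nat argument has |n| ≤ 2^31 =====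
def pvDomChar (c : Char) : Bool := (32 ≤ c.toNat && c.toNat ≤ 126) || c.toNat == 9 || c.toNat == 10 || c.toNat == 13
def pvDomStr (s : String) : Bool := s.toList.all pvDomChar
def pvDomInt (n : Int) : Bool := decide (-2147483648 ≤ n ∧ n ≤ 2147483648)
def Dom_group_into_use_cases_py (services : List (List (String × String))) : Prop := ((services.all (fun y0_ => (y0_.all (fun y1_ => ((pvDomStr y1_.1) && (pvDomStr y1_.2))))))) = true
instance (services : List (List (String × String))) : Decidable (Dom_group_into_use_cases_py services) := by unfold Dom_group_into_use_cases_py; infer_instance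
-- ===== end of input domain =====

-- B replaces A's single-pass defaultdict accumulation (if/elif chain) by three staged
-- passes: label each func with its bucket, dedup labels in first-encounter order, then
-- collect each bucket by filtering; A raises KeyError on a func without a 'name' key,
-- those inputs are excluded by Pre_.

-- shared: func['name'].lower() (the KeyError case is excluded by Pre_; getD "" there)
def pyName (func : List (String × String)) : String :=
  PySem.Str.lower (((PySem.Dict.mk func).get? "name").getD "")

-- ===== PORT A =====
def group_into_use_cases_py (services : List (List (String × String))) : List (String × List (List (String × String))) :=
  (services.foldl (fun (groups : PySem.Dict String (List (List (String × String)))) func =>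
    let name := pyName func
    if PySem.Str.isIn "create" name || PySem.Str.isIn "add" name then
      groups.modify "create_entity" [] (· ++ [func])
    else if PySem.Str.isIn "update" name || PySem.Str.isIn "edit" name then
      groups.modify "update_entity" [] (· ++ [func])
    else if PySem.Str.isIn "delete" name || PySem.Str.isIn "remove" name then
      groups.modify "delete_entity" [] (· ++ [func])
    else if PySem.Str.isIn "get" name || PySem.Str.isIn "find" name || PySem.Str.isIn "list" name then
      groups.modify "query_entity" [] (· ++ [func])
    else
      groups.modify "process_business_logic" [] (· ++ [func])) PySem.Dict.empty).items

-- ===== PORT B =====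
def pvRules : List (String × List String) :=
  [("create_entity", ["create", "add"]),
   ("update_entity", ["update", "edit"]),
   ("delete_entity", ["delete", "remove"]),
   ("query_entity", ["get", "find", "list"])]

-- _classify: first rule whose keyword list matches, else the default bucket
def pvClassify (name : String) : String :=
  ((pvRules.find? (fun r => r.2.any (fun kw => PySem.Str.isIn kw name))).map (·.1)).getD
    "process_business_logic"

def group_into_use_cases_py_alt (services : List (List (String × String))) : List (String × List (List (String × String))) :=
  let labeled := services.map (fun f => (pvClassify (pyName f), f))
  let order := PySem.List.dedup (labeled.map (·.1))
  order.map (fun b => (b, (labeled.filter (fun p => p.1 == b)).map (·.2)))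

-- ===== PRECONDITION & SPEC =====
-- Pre_ excludes exactly the inputs where A raises KeyError: a func without a 'name' key.
def Pre_group_into_use_cases_py (services : List (List (String × String))) : Prop :=
  (services.all (fun func => func.any (fun p => p.1 == "name"))) = true
instance (services : List (List (String × String))) : Decidable (Pre_group_into_use_cases_py services) := by unfold Pre_group_into_use_cases_py; infer_instance

def pvWitness_group_into_use_cases_py : (List (List (String × String))) :=
  [[("name", "create_user")], [("name", "list_orders")], [("name", "sync")]]

def Spec_group_into_use_cases_py (services : List (List (String × String))) (out : List (String × List (List (String × String)))) : Prop := out = group_into_use_cases_py_alt services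
instance (services : List (List (String × String))) (out : List (String × List (List (String × String)))) : Decidable (Spec_group_into_use_cases_py services out) := by unfold Spec_group_into_use_cases_py; infer_instance

-- ===== CLAIM (what is proved, stated in full; the proofs are below) =====
def Claim_equal_group_into_use_cases_py : Prop := ∀ (services : List (List (String × String))), Dom_group_into_use_cases_py services → Pre_group_into_use_cases_py services → Spec_group_into_use_cases_py services (group_into_use_cases_py services)

-- ===== LEMMAS AND PROOFS =====

lemma tl_create : "create".toList = ['c','r','e','a','t','e'] := rfl
lemma tl_add : "add".toList = ['a','d','d'] := rfl
lemma tl_update : "update".toList = ['u','p','d','a','t','e'] := rfl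
lemma tl_edit : "edit".toList = ['e','d','i','t'] := rfl
lemma tl_delete : "delete".toList = ['d','e','l','e','t','e'] := rfl
lemma tl_remove : "remove".toList = ['r','e','m','o','v','e'] := rfl
lemma tl_get : "get".toList = ['g','e','t'] := rfl
lemma tl_find : "find".toList = ['f','i','n','d'] := rfl
lemma tl_list : "list".toList = ['l','i','s','t'] := rfl

-- A's if/elif step is 'modify at the classified bucket'
lemma step_eq (groups : PySem.Dict String (List (List (String × String)))) (func : List (String × String)) :
    (let name := pyName func
     if PySem.Str.isIn "create" name || PySem.Str.isIn "add" name then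
       groups.modify "create_entity" [] (· ++ [func])
     else if PySem.Str.isIn "update" name || PySem.Str.isIn "edit" name then
       groups.modify "update_entity" [] (· ++ [func])
     else if PySem.Str.isIn "delete" name || PySem.Str.isIn "remove" name then
       groups.modify "delete_entity" [] (· ++ [func])
     else if PySem.Str.isIn "get" name || PySem.Str.isIn "find" name || PySem.Str.isIn "list" name then
       groups.modify "query_entity" [] (· ++ [func])
     else
       groups.modify "process_business_logic" [] (· ++ [func]))
    = groups.modify (pvClassify (pyName func)) [] (· ++ [func]) := by
  dsimp only [pvClassify]
  generalize pyName func = name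
  cases h1 : (PySem.Str.isIn "create" name || PySem.Str.isIn "add" name) <;>
  cases h2 : (PySem.Str.isIn "update" name || PySem.Str.isIn "edit" name) <;>
  cases h3 : (PySem.Str.isIn "delete" name || PySem.Str.isIn "remove" name) <;>
  cases h4 : (PySem.Str.isIn "get" name || PySem.Str.isIn "find" name || PySem.Str.isIn "list" name) <;>
    (simp only [PySem.Str.isIn, tl_create, tl_add, tl_update, tl_edit, tl_delete, tl_remove, tl_get, tl_find, tl_list, Bool.or_assoc] at h1 h2 h3 h4;
     simp [pvRules, List.find?, h1, h2, h3, h4])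

-- ===== VERDICT (by name: the statement is the Claim_ definition above) =====
theorem group_into_use_cases_py_spec : Claim_equal_group_into_use_cases_py := by
  intro services _ _
  unfold Spec_group_into_use_cases_py group_into_use_cases_py group_into_use_cases_py_alt
  have hf : (services.foldl (fun (groups : PySem.Dict String (List (List (String × String)))) func =>
      let name := pyName func
      if PySem.Str.isIn "create" name || PySem.Str.isIn "add" name then
        groups.modify "create_entity" [] (· ++ [func])
      else if PySem.Str.isIn "update" name || PySem.Str.isIn "edit" name then
        groups.modify "update_entity" [] (· ++ [func])
      else if PySem.Str.isIn "delete" name || PySem.Str.isIn "remove" name then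
        groups.modify "delete_entity" [] (· ++ [func])
      else if PySem.Str.isIn "get" name || PySem.Str.isIn "find" name || PySem.Str.isIn "list" name then
        groups.modify "query_entity" [] (· ++ [func])
      else
        groups.modify "process_business_logic" [] (· ++ [func])) PySem.Dict.empty)
      = ((services.map (fun f => (pvClassify (pyName f), f))).foldl
          (fun (d : PySem.Dict String (List (List (String × String)))) p => d.modify p.1 [] (· ++ [p.2])) PySem.Dict.empty) := by
    rw [List.foldl_map]
    apply PySem.List.foldl_congr_mem
    intro d func _
    exact step_eq d func
  rw [hf]
  generalize services.map (fun f => (pvClassify (pyName f), f)) = labeled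
  have hnd : ((labeled.foldl (fun (d : PySem.Dict String (List (List (String × String)))) p => d.modify p.1 [] (· ++ [p.2])) PySem.Dict.empty)).keys.Nodup := by
    exact PySem.Dict.nodup_keys_foldl_modify_key labeled (·.1) [] (fun d x => (· ++ [x.2])) PySem.Dict.empty (by simp)
  rw [PySem.Dict.items_eq_map_keys _ hnd []]
  have hkeys : ((labeled.foldl (fun (d : PySem.Dict String (List (List (String × String)))) p => d.modify p.1 [] (· ++ [p.2])) PySem.Dict.empty)).keys
      = PySem.List.dedup (labeled.map (·.1)) := by
    rw [PySem.Dict.keys_foldl_modify_key]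
    simp [PySem.Set.update_nil_left]
  rw [hkeys]
  refine List.map_congr_left (fun b _ => ?_)
  rw [PySem.Dict.getD_foldl_modify_append]
  simp
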